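-- pv_equiv track=rewrite | github.com/allisnone/pytrade | tradeStrategy.py | get_continue_incrs
-- ===== SOURCE A (Python) =====
-- def get_continue_incrs(index_list):
--     #index_list = [244, 245, 247, 248, 249, 250, 251, 252, 253, 254, 255, 256]
--     count = len(index_list)
--     if count == 0:
--         return 0,0
--     loop_count = count -1
--     while loop_count>0:
--         if (index_list[loop_count] -index_list[loop_count-1])==1:
--             loop_count = loop_count - 1
--         else:
--             break
--     min_incrs_index = index_list[loop_count]
--     continue_incrs_count = count - loop_count
--     return continue_incrs_count,min_incrs_index
-- ===== SOURCE B (Python) =====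
-- def get_continue_incrs(index_list):
--     if not index_list:
--         return 0, 0
--     run = 0
--     for prev, cur in zip(index_list, index_list[1:]):
--         run = run + 1 if cur - prev == 1 else 0
--     return run + 1, index_list[len(index_list) - 1 - run]
-- ===== Notes on version B (the rewrite author's own statement) =====
-- stated objective: alternative
-- what changed: Replaces A's backward while-loop with early break (scanning from the end until a gap) by a single forward fold over adjacent pairs that maintains a resetting run counter, then derives the result arithmetically from the final run length.
import Mathlib
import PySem

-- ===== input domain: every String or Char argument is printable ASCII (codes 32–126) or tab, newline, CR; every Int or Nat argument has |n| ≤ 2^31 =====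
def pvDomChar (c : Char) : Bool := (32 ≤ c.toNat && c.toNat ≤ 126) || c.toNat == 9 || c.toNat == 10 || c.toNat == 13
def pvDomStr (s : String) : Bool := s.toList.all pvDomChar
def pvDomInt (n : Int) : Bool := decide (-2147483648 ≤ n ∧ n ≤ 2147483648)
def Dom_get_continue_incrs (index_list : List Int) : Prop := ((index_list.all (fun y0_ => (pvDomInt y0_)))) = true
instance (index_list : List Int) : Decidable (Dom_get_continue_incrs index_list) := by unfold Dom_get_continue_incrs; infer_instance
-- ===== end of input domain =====

-- B replaces A's backward while-loop (break at first gap) with one forward fold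
-- maintaining a resetting run counter; alternative decomposition, same cost.


-- ===== PORT A =====
-- the while-loop: decrement loop_count while the adjacent difference is 1, break otherwise
def aLoop (xs : List Int) : Nat → Nat
  | 0 => 0
  | k + 1 => if xs.getD (k + 1) 0 - xs.getD k 0 = 1 then aLoop xs k else k + 1

def get_continue_incrs (index_list : List Int) : Int × Int :=
  let count := index_list.length
  if count = 0 then (0, 0)
  else
    let loop_count := aLoop index_list (count - 1)
    ((count : Int) - (loop_count : Int), index_list.getD loop_count 0)

-- ===== PORT B =====
def get_continue_incrs_alt (index_list : List Int) : Int × Int :=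
  match index_list with
  | [] => (0, 0)
  | _ :: _ =>
    let run := (index_list.zip index_list.tail).foldl
      (fun r p => if p.2 - p.1 = 1 then r + 1 else 0) (0 : Nat)
    ((run : Int) + 1, index_list.getD (index_list.length - 1 - run) 0)

-- ===== PRECONDITION & SPEC =====
def Spec_get_continue_incrs (index_list : List Int) (out : Int × Int) : Prop := out = get_continue_incrs_alt index_list
instance (index_list : List Int) (out : Int × Int) : Decidable (Spec_get_continue_incrs index_list out) := by unfold Spec_get_continue_incrs; infer_instance

-- ===== CLAIM (what is proved, stated in full; the proofs are below) =====
def Claim_equal_get_continue_incrs : Prop := ∀ (index_list : List Int), Dom_get_continue_incrs index_list → Spec_get_continue_incrs index_list (get_continue_incrs index_list)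

-- ===== LEMMAS AND PROOFS =====

def runF (L : List (Int × Int)) : Nat :=
  L.foldl (fun r p => if p.2 - p.1 = 1 then r + 1 else 0) 0

theorem runF_le (L : List (Int × Int)) : ∀ n, L.foldl (fun r p => if p.2 - p.1 = 1 then r + 1 else 0) n ≤ n + L.length := by
  induction L with
  | nil => intro n; simp
  | cons p L ih =>
    intro n
    simp only [List.foldl_cons, List.length_cons]
    refine le_trans (ih _) ?_
    split_ifs <;> omega

theorem runF_append (L : List (Int × Int)) (p : Int × Int) :
    runF (L ++ [p]) = if p.2 - p.1 = 1 then runF L + 1 else 0 := by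
  simp [runF, List.foldl_append]

theorem aLoop_eq (xs : List Int) :
    ∀ k, k ≤ (xs.zip xs.tail).length →
      aLoop xs k = k - runF ((xs.zip xs.tail).take k) := by
  intro k
  induction k with
  | zero => intro _; simp [aLoop, runF]
  | succ k ih =>
    intro hk
    have hk' : k < (xs.zip xs.tail).length := by omega
    have hlen : (xs.zip xs.tail).length = min xs.length xs.tail.length := List.length_zip
    have hlt : k + 1 < xs.length := by
      rcases xs with _ | ⟨x, rest⟩
      · simp at hk'
      · simp [List.length_zip] at hk' ⊢; omega
    have hget : (xs.zip xs.tail)[k] = (xs[k]'(by omega), xs[k+1]'hlt) := by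
      rcases xs with _ | ⟨x, rest⟩
      · simp at hk'
      · simp [List.getElem_zip]
    have htake : (xs.zip xs.tail).take (k+1) = (xs.zip xs.tail).take k ++ [(xs.zip xs.tail)[k]] :=
      List.take_succ_eq_append_getElem hk'
    have hrun_le : runF ((xs.zip xs.tail).take k) ≤ k := by
      have h1 := runF_le ((xs.zip xs.tail).take k) 0
      have h2 : ((xs.zip xs.tail).take k).length ≤ k := by
        simp [List.length_take]
      simp only [runF]
      omega
    rw [aLoop]
    have hgd1 : xs.getD (k+1) 0 = xs[k+1]'hlt := List.getD_eq_getElem xs 0 hlt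
    have hgd0 : xs.getD k 0 = xs[k]'(by omega) := List.getD_eq_getElem xs 0 (by omega)
    rw [htake, runF_append, hget, hgd1, hgd0]
    split_ifs with h
    · rw [ih (by omega)]; omega
    · simp

theorem get_continue_incrs_spec : Claim_equal_get_continue_incrs := by
  intro xs _
  unfold Spec_get_continue_incrs
  rcases xs with _ | ⟨x, rest⟩
  · rfl
  · set xs := x :: rest with hxs
    have hlen0 : xs.length = rest.length + 1 := by simp [hxs]
    have hzlen : (xs.zip xs.tail).length = rest.length := by
      simp [hxs, List.length_zip]
    have hA := aLoop_eq xs (xs.length - 1) (by omega)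
    have htake : (xs.zip xs.tail).take (xs.length - 1) = xs.zip xs.tail := by
      apply List.take_of_length_le; omega
    rw [htake] at hA
    have hrun_le : runF (xs.zip xs.tail) ≤ xs.length - 1 := by
      have := runF_le (xs.zip xs.tail) 0
      simp [runF] at this ⊢; omega
    simp only [get_continue_incrs, get_continue_incrs_alt, hxs]
    rw [← hxs]  -- keep xs folded
    simp only [hlen0]
    have : aLoop xs (rest.length + 1 - 1) = rest.length - runF (xs.zip xs.tail) := by
      simpa [hlen0] using hA
    rw [show rest.length + 1 - 1 = rest.length from rfl] at this ⊢
    rw [this, if_neg (Nat.succ_ne_zero rest.length)]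
    have hr : (List.foldl (fun r p => if p.2 - p.1 = 1 then r + 1 else 0) 0 (xs.zip xs.tail)) = runF (xs.zip xs.tail) := rfl
    rw [hr]
    have h1 : runF (xs.zip xs.tail) ≤ rest.length := by omega
    refine Prod.ext ?_ rfl
    simp only
    omega

-- ===== VERDICT (by name: the statement is the Claim_ definition above) =====
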